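-- pv_equiv track=rewrite | github.com/fresh-fx59/iron-lady-assistant | src/metrics.py | _tool_mix
-- ===== SOURCE A (Python) =====
-- _CORE_TOOL_NAMES = frozenset({
--     "read",
--     "write",
--     "edit",
--     "grep",
--     "glob",
--     "list",
--     "ls",
--     "bash",
--     "task",
--     "askuserquestion",
--     "enterplanmode",
--     "exitplanmode",
--     "web_search",
--     "weather",
--     "sports",
--     "finance",
--     "time",
--     "open",
--     "click",
--     "find",
--     "screenshot",
--     "image_query",
-- })
--
-- def _tool_mix(tool_names: list[str]) -> str:
--     if not tool_names:
--         return "none"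
--     normalized = [name.strip().lower() for name in tool_names if name and name.strip()]
--     if not normalized:
--         return "none"
--     core_count = sum(1 for name in normalized if name in _CORE_TOOL_NAMES)
--     if core_count == len(normalized):
--         return "core_only"
--     if core_count == 0:
--         return "extended_only"
--     return "mixed"
-- ===== SOURCE B (Python) =====
-- _CORE_TOOL_NAMES = frozenset({
--     "read", "write", "edit", "grep", "glob", "list", "ls", "bash", "task",
--     "askuserquestion", "enterplanmode", "exitplanmode", "web_search",
--     "weather", "sports", "finance", "time", "open", "click", "find",
--     "screenshot", "image_query",
-- })
--
-- def _tool_mix(tool_names: list[str]) -> str: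
--     # single pass, early exit: a tiny state machine instead of normalize-then-count
--     state = "none"
--     for name in tool_names:
--         if not name or not name.strip():
--             continue
--         kind = "core_only" if name.strip().lower() in _CORE_TOOL_NAMES else "extended_only"
--         if state == "none":
--             state = kind
--         elif state != kind:
--             return "mixed"
--     return state
-- ===== Notes on version B (the rewrite author's own statement) =====
-- stated objective: alternative
-- what changed: Replaced A's staged normalize-into-a-list then count-and-compare-to-length logic with a single pass over the raw names maintaining a 3-state accumulator (none/core_only/extended_only) that returns 'mixed' immediately when both kinds have been seen; no intermediate list is built.
import Mathlib
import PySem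

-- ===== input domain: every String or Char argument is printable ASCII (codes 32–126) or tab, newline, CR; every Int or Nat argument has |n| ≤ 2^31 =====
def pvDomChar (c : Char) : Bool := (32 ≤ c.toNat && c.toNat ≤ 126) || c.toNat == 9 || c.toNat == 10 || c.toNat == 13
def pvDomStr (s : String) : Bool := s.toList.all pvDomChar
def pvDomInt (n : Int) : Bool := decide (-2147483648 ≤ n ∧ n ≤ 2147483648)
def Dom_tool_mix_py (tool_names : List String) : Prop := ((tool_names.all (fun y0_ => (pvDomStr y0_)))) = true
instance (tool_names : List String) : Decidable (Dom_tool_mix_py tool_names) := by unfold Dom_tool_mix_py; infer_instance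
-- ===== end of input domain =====

-- B replaces A's normalize-then-count staged passes with one early-exiting pass keeping a 3-state accumulator; alternative decomposition, same cost.

def pvCoreToolNames : List String :=
  ["read", "write", "edit", "grep", "glob", "list", "ls", "bash", "task",
   "askuserquestion", "enterplanmode", "exitplanmode", "web_search",
   "weather", "sports", "finance", "time", "open", "click", "find",
   "screenshot", "image_query"]

-- ===== PORT A =====
def tool_mix_py (tool_names : List String) : String :=
  if tool_names = [] then "none"
  else
    let normalized :=
      (tool_names.filter
          (fun name => !(name == "") && !(PySem.Str.strip name == ""))).map
        (fun name => PySem.Str.lower (PySem.Str.strip name))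
    if normalized = [] then "none"
    else
      let core_count := normalized.countP (fun name => pvCoreToolNames.contains name)
      if core_count = normalized.length then "core_only"
      else if core_count = 0 then "extended_only"
      else "mixed"

-- ===== PORT B =====
-- the for-loop with `continue` and early `return "mixed"` as structural recursion on the list
def toolMixGo : List String → String → String
  | [], state => state
  | name :: rest, state =>
    if name == "" || PySem.Str.strip name == "" then toolMixGo rest state
    else
      let kind := if pvCoreToolNames.contains (PySem.Str.lower (PySem.Str.strip name))
                  then "core_only" else "extended_only"
      if state == "none" then toolMixGo rest kind
      else if state != kind then "mixed"
      else toolMixGo rest state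

def tool_mix_py_alt (tool_names : List String) : String :=
  toolMixGo tool_names "none"

-- ===== PRECONDITION & SPEC =====
def Spec_tool_mix_py (tool_names : List String) (out : String) : Prop := out = tool_mix_py_alt tool_names
instance (tool_names : List String) (out : String) : Decidable (Spec_tool_mix_py tool_names out) := by unfold Spec_tool_mix_py; infer_instance

-- ===== CLAIM (what is proved, stated in full; the proofs are below) =====
def Claim_equal_tool_mix_py : Prop := ∀ (tool_names : List String), Dom_tool_mix_py tool_names → Spec_tool_mix_py tool_names (tool_mix_py tool_names)

-- ===== LEMMAS AND PROOFS =====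

def pvNorm (l : List String) : List String :=
  (l.filter (fun name => !(name == "") && !(PySem.Str.strip name == ""))).map
    (fun name => PySem.Str.lower (PySem.Str.strip name))

def pvCount (l : List String) : Nat :=
  (pvNorm l).countP (fun name => pvCoreToolNames.contains name)

theorem toolMixGo_spec (l : List String) :
    (toolMixGo l "none" =
      if pvNorm l = [] then "none"
      else if pvCount l = (pvNorm l).length then "core_only"
      else if pvCount l = 0 then "extended_only"
      else "mixed") ∧
    (toolMixGo l "core_only" =
      if pvCount l = (pvNorm l).length then "core_only" else "mixed") ∧
    (toolMixGo l "extended_only" =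
      if pvCount l = 0 then "extended_only" else "mixed") := by
  induction l with
  | nil => simp [toolMixGo, pvNorm, pvCount]
  | cons name rest ih =>
    obtain ⟨ihn, ihc, ihe⟩ := ih
    have hle : pvCount rest ≤ (pvNorm rest).length := List.countP_le_length
    by_cases hskip : (name == "" || PySem.Str.strip name == "") = true
    · have hfilt : (!(name == "") && !(PySem.Str.strip name == "")) = false := by
        cases h1 : (name == "") <;> cases h2 : (PySem.Str.strip name == "") <;> simp_all
      simp only [toolMixGo, hskip, if_true]
      have hn : pvNorm (name :: rest) = pvNorm rest := by
        simp [pvNorm, hfilt]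
      have hc : pvCount (name :: rest) = pvCount rest := by
        simp [pvCount, hn]
      rw [hn, hc]
      exact ⟨ihn, ihc, ihe⟩
    · have hfilt : (!(name == "") && !(PySem.Str.strip name == "")) = true := by
        cases h1 : (name == "") <;> cases h2 : (PySem.Str.strip name == "") <;> simp_all
      have hnorm : pvNorm (name :: rest) =
          PySem.Str.lower (PySem.Str.strip name) :: pvNorm rest := by
        simp [pvNorm, hfilt]
      by_cases hcore : pvCoreToolNames.contains (PySem.Str.lower (PySem.Str.strip name)) = true
      · have hcnt : pvCount (name :: rest) = pvCount rest + 1 := by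
          simp only [pvCount, hnorm, List.countP_cons]
          simp only [List.contains_iff_mem] at hcore
          simp [hcore]
        refine ⟨?_, ?_, ?_⟩ <;>
        · simp only [toolMixGo, hskip, Bool.false_eq_true, if_false, hcore, if_true]
          simp only [hnorm, hcnt, ihc, List.length_cons]
          by_cases h : pvCount rest = (pvNorm rest).length
          · simp [h]
          · have h' : ¬ (pvCount rest + 1 = (pvNorm rest).length + 1) := by omega
            simp only [if_neg h, if_neg h']
            simp
      · have hcnt : pvCount (name :: rest) = pvCount rest := by
          simp only [pvCount, hnorm, List.countP_cons]
          simp only [List.contains_iff_mem] at hcore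
          simp [hcore]
        refine ⟨?_, ?_, ?_⟩ <;>
        · simp only [toolMixGo, hskip, Bool.false_eq_true, if_false, hcore, if_false]
          simp only [hnorm, hcnt, ihe, List.length_cons]
          have hlen : ¬ (pvCount rest = (pvNorm rest).length + 1) := by omega
          by_cases h : pvCount rest = 0 <;> simp [h, hlen]

-- ===== VERDICT (by name: the statement is the Claim_ definition above) =====
theorem tool_mix_py_spec : Claim_equal_tool_mix_py := by
  intro tool_names _
  unfold Spec_tool_mix_py tool_mix_py tool_mix_py_alt
  by_cases h0 : tool_names = []
  · simp [h0, toolMixGo]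
  · rw [if_neg h0, (toolMixGo_spec tool_names).1]
    rfl
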